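-- pv_equiv track=rewrite | github.com/thehuan0/A-Maze-ing | mazegen/generator.py | _build_heart
-- ===== SOURCE A (Python) =====
-- _HEART_ORIG_W: int = 13
--
-- _HEART_ORIG_H: int = 11
--
-- _HEART_SCALE: int = 2
--
-- _HEART_ORIG: list[list[int]] = [
--     [0, 0, 1, 1, 1, 0, 0, 0, 1, 1, 1, 0, 0],
--     [0, 1, 1, 1, 1, 1, 0, 1, 1, 1, 1, 1, 0],
--     [1, 1, 1, 1, 1, 1, 1, 1, 1, 1, 1, 1, 1],
--     [1, 1, 1, 1, 1, 1, 1, 1, 1, 1, 1, 1, 1],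
--     [1, 1, 1, 1, 1, 1, 1, 1, 1, 1, 1, 1, 1],
--     [0, 1, 1, 1, 1, 1, 1, 1, 1, 1, 1, 1, 0],
--     [0, 0, 1, 1, 1, 1, 1, 1, 1, 1, 1, 0, 0],
--     [0, 0, 0, 1, 1, 1, 1, 1, 1, 1, 0, 0, 0],
--     [0, 0, 0, 0, 1, 1, 1, 1, 1, 0, 0, 0, 0],
--     [0, 0, 0, 0, 0, 1, 1, 1, 0, 0, 0, 0, 0],
--     [0, 0, 0, 0, 0, 0, 1, 0, 0, 0, 0, 0, 0],
-- ]
--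
-- def _build_heart(ox: int, oy: int) -> set[tuple[int, int]]:
--     """Build the set of cells inside the heart silhouette.
--
--     Args:
--         ox: Column offset for the left edge of the heart bounding box.
--         oy: Row offset for the top edge of the heart bounding box.
--
--     Returns:
--         Set of (x, y) cell coordinates that are inside the heart shape.
--     """
--     cells: set[tuple[int, int]] = set()
--     for r in range(_HEART_ORIG_H):
--         for c in range(_HEART_ORIG_W):
--             if _HEART_ORIG[r][c]:
--                 for dr in range(_HEART_SCALE):
--                     for dc in range(_HEART_SCALE):
--                         cells.add((
--                             ox + c * _HEART_SCALE + dc,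
--                             oy + r * _HEART_SCALE + dr,
--                         ))
--     return cells
-- ===== SOURCE B (Python) =====
-- _HEART_SCALE: int = 2
--
-- # Heart silhouette as per-row run-length encoding: for each source row,
-- # the half-open column intervals [c0, c1) of filled cells, left to right.
-- _HEART_RUNS: list[list[tuple[int, int]]] = [
--     [(2, 5), (8, 11)],
--     [(1, 6), (7, 12)],
--     [(0, 13)],
--     [(0, 13)],
--     [(0, 13)],
--     [(1, 12)],
--     [(2, 11)],
--     [(3, 10)],
--     [(4, 9)],
--     [(5, 8)],
--     [(6, 7)],
-- ]
--
--
-- def _build_heart(ox: int, oy: int) -> set[tuple[int, int]]: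
--     """Build the set of cells inside the heart silhouette.
--
--     Walks a run-length encoding of the silhouette (per-row filled
--     intervals) instead of testing every bitmap cell; each source cell of a
--     run contributes its 2x2 scaled block with four explicit additions.
--     """
--     cells: set[tuple[int, int]] = set()
--     for r, runs in enumerate(_HEART_RUNS):
--         y = oy + r * _HEART_SCALE
--         for c0, c1 in runs:
--             for c in range(c0, c1):
--                 x = ox + c * _HEART_SCALE
--                 cells.add((x, y))
--                 cells.add((x + 1, y))
--                 cells.add((x, y + 1))
--                 cells.add((x + 1, y + 1))
--     return cells
-- ===== Notes on version B (the rewrite author's own statement) =====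
-- stated objective: alternative
-- what changed: Replaces the bitmap scan (truthiness test on every one of the 143 cells) by a run-length-encoded silhouette: B stores each row as its filled column intervals and walks only the runs, emitting each cell's 2x2 scaled block with four explicit additions instead of the two innermost loops.
import Mathlib
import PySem

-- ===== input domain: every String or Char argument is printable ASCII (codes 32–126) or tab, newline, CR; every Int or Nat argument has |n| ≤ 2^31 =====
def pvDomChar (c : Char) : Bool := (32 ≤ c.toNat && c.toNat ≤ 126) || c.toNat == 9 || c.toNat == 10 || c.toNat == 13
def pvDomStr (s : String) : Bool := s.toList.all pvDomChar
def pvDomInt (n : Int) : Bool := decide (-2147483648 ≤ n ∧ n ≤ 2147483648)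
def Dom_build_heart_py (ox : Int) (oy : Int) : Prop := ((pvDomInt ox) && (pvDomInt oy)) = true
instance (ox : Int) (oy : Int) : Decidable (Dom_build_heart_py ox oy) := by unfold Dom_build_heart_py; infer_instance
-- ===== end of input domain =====

-- B walks a run-length encoding of the silhouette (per-row filled intervals) instead of scanning the bitmap; alternative data structure, same result.


-- module constants of the Python file A
def heartOrigW : Int := 13
def heartOrigH : Int := 11
def heartScale : Int := 2
def heartOrig : List (List Int) := [
  [0, 0, 1, 1, 1, 0, 0, 0, 1, 1, 1, 0, 0],
  [0, 1, 1, 1, 1, 1, 0, 1, 1, 1, 1, 1, 0],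
  [1, 1, 1, 1, 1, 1, 1, 1, 1, 1, 1, 1, 1],
  [1, 1, 1, 1, 1, 1, 1, 1, 1, 1, 1, 1, 1],
  [1, 1, 1, 1, 1, 1, 1, 1, 1, 1, 1, 1, 1],
  [0, 1, 1, 1, 1, 1, 1, 1, 1, 1, 1, 1, 0],
  [0, 0, 1, 1, 1, 1, 1, 1, 1, 1, 1, 0, 0],
  [0, 0, 0, 1, 1, 1, 1, 1, 1, 1, 0, 0, 0],
  [0, 0, 0, 0, 1, 1, 1, 1, 1, 0, 0, 0, 0],
  [0, 0, 0, 0, 0, 1, 1, 1, 0, 0, 0, 0, 0],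
  [0, 0, 0, 0, 0, 0, 1, 0, 0, 0, 0, 0, 0]]

-- ===== PORT A =====
-- in-range indexing _HEART_ORIG[r][c] ported with pyGetD (exact here: r and c range inside the bitmap); truthiness of int = ≠ 0
def build_heart_py (ox : Int) (oy : Int) : List (Int × Int) :=
  (PySem.List.pyRange 0 heartOrigH 1).foldl (fun cells r =>
    (PySem.List.pyRange 0 heartOrigW 1).foldl (fun cells c =>
      if PySem.List.pyGetD (PySem.List.pyGetD heartOrig r []) c 0 ≠ 0 then
        (PySem.List.pyRange 0 heartScale 1).foldl (fun cells dr =>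
          (PySem.List.pyRange 0 heartScale 1).foldl (fun cells dc =>
            PySem.Set.add cells (ox + c * heartScale + dc, oy + r * heartScale + dr)) cells) cells
      else cells) cells) PySem.Set.empty

-- ===== PORT B =====
-- module constants of Source B: the silhouette as per-row run-length encoding
def heartRuns : List (List (Int × Int)) := [
  [(2, 5), (8, 11)],
  [(1, 6), (7, 12)],
  [(0, 13)],
  [(0, 13)],
  [(0, 13)],
  [(1, 12)],
  [(2, 11)],
  [(3, 10)],
  [(4, 9)],
  [(5, 8)],
  [(6, 7)]]

-- enumerate → PySem.List.enumerate; range(c0, c1) → pyRange; four explicit set.add calls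
def build_heart_py_alt (ox : Int) (oy : Int) : List (Int × Int) :=
  (PySem.List.enumerate heartRuns).foldl (fun cells rp =>
    let y := oy + rp.1 * heartScale
    rp.2.foldl (fun cells run =>
      (PySem.List.pyRange run.1 run.2 1).foldl (fun cells c =>
        let x := ox + c * heartScale
        PySem.Set.add (PySem.Set.add (PySem.Set.add (PySem.Set.add cells
          (x, y)) (x + 1, y)) (x, y + 1)) (x + 1, y + 1)) cells) cells) PySem.Set.empty

-- ===== PRECONDITION & SPEC =====
def Spec_build_heart_py (ox : Int) (oy : Int) (out : List (Int × Int)) : Prop := out = build_heart_py_alt ox oy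
instance (ox : Int) (oy : Int) (out : List (Int × Int)) : Decidable (Spec_build_heart_py ox oy out) := by unfold Spec_build_heart_py; infer_instance

-- ===== CLAIM (what is proved, stated in full; the proofs are below) =====
def Claim_equal_build_heart_py : Prop := ∀ (ox : Int) (oy : Int), Dom_build_heart_py ox oy → Spec_build_heart_py ox oy (build_heart_py ox oy)

-- ===== LEMMAS AND PROOFS =====

-- translation of a cell by the offsets
def pvT (ox oy : Int) (p : Int × Int) : Int × Int := (ox + p.1, oy + p.2)

-- the sequence of cells A inserts into its set, as a pure list (flatMap form of A's nested loops)
def pvLA (ox oy : Int) : List (Int × Int) :=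
  (PySem.List.pyRange 0 heartOrigH 1).flatMap (fun r =>
    (PySem.List.pyRange 0 heartOrigW 1).flatMap (fun c =>
      if PySem.List.pyGetD (PySem.List.pyGetD heartOrig r []) c 0 ≠ 0 then
        (PySem.List.pyRange 0 heartScale 1).flatMap (fun dr =>
          (PySem.List.pyRange 0 heartScale 1).map (fun dc =>
            (ox + c * heartScale + dc, oy + r * heartScale + dr)))
      else []))

-- the sequence of cells B inserts into its set, as a pure list (flatMap form of B's run walk)
def pvLB (ox oy : Int) : List (Int × Int) :=
  (PySem.List.enumerate heartRuns).flatMap (fun rp =>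
    rp.2.flatMap (fun run =>
      (PySem.List.pyRange run.1 run.2 1).flatMap (fun c =>
        [(ox + c * heartScale, oy + rp.1 * heartScale),
         (ox + c * heartScale + 1, oy + rp.1 * heartScale),
         (ox + c * heartScale, oy + rp.1 * heartScale + 1),
         (ox + c * heartScale + 1, oy + rp.1 * heartScale + 1)])))

theorem foldl_flatMap' {ι α β : Type} (l : List ι) (g : ι → List α) (f : β → α → β) (a : β) :
    (l.flatMap g).foldl f a = l.foldl (fun a x => (g x).foldl f a) a := by
  induction l generalizing a with
  | nil => rfl
  | cons x xs ih => simp only [List.flatMap_cons, List.foldl_append, List.foldl_cons, ih]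

theorem A_eq (ox oy : Int) :
    build_heart_py ox oy = (pvLA ox oy).foldl PySem.Set.add PySem.Set.empty := by
  unfold build_heart_py pvLA
  rw [foldl_flatMap']
  congr 1
  funext cells r
  rw [foldl_flatMap']
  congr 1
  funext cells c
  split_ifs with h
  · rw [foldl_flatMap']
    congr 1
  · rfl

theorem B_eq (ox oy : Int) :
    build_heart_py_alt ox oy = (pvLB ox oy).foldl PySem.Set.add PySem.Set.empty := by
  unfold build_heart_py_alt pvLB
  rw [foldl_flatMap']
  congr 1
  funext cells rp
  show List.foldl _ cells rp.2 = _
  rw [foldl_flatMap']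
  congr 1
  funext cells run
  show List.foldl _ cells _ = _
  rw [foldl_flatMap']
  congr 1

theorem pvLA_map (ox oy : Int) : pvLA ox oy = (pvLA 0 0).map (pvT ox oy) := by
  unfold pvLA
  rw [List.map_flatMap]
  congr 1
  funext r
  rw [List.map_flatMap]
  congr 1
  funext c
  split_ifs with h
  · rw [List.map_flatMap]
    congr 1
    funext dr
    rw [List.map_map]
    congr 1
    funext dc
    simp only [Function.comp, pvT]
    exact Prod.ext (by ring) (by ring)
  · rfl

theorem pvLB_map (ox oy : Int) : pvLB ox oy = (pvLB 0 0).map (pvT ox oy) := by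
  unfold pvLB
  rw [List.map_flatMap]
  congr 1
  funext rp
  rw [List.map_flatMap]
  congr 1
  funext run
  rw [List.map_flatMap]
  congr 1
  funext c
  simp only [List.map_cons, List.map_nil, pvT]
  refine congrArg₂ _ (Prod.ext (by ring) (by ring)) ?_
  refine congrArg₂ _ (Prod.ext (by ring) (by ring)) ?_
  refine congrArg₂ _ (Prod.ext (by ring) (by ring)) ?_
  exact congrArg (fun p => [p]) (Prod.ext (by ring) (by ring))

set_option maxHeartbeats 4000000 in
set_option maxRecDepth 100000 in
theorem pv_base_eq : pvLA 0 0 = pvLB 0 0 := by decide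

-- ===== VERDICT (by name: the statement is the Claim_ definition above) =====
theorem build_heart_py_spec : Claim_equal_build_heart_py := by
  intro ox oy _
  unfold Spec_build_heart_py
  rw [A_eq, B_eq, pvLA_map, pvLB_map, pv_base_eq]
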